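-- pv_equiv track=rewrite | github.com/Jh-jaehyuk/Programmers_lv2 | 23.04.30/[2023 카카오 블라인드] 택배 배달과 수거하기_그리디 연습.py | solution
-- ===== SOURCE A (Python) =====
-- def solution(cap, n, deliveries, pickups):
--     answer = 0
--     # 배달, 회수 값을 기본 0으로 설정
--     d, p = 0, 0
--     # 배달, 회수목록을 맨 뒤에서부터 지나오면
--     for i in range(n - 1, -1, -1):
--         count = 0
--         # 배달, 회수 해야되는 값을 0에서 빼줌
--         d -= deliveries[i]
--         p -= pickups[i]
--         # 둘 중 하나라도 음수인 경우,
--         while d < 0 or p < 0: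
--             # 둘 다 양수가 될 때까지 cap을 더해줌
--             # cap을 더해준다는 것은 그만큼 왕복으로 이동했다는 뜻.
--             d += cap
--             p += cap
--             # 왕복한만큼 카운트 증가
--             count += 1
--         # 이동거리는 항상 (i + 1) * 2 인데
--         # 왕복한 경우에는 count만큼 곱해주어야 함.
--         # 단, 둘 다 0인 경우. 따라서 d, p가 둘 다 0 이상인 경우엔
--         # 방문 할 필요가 없으므로 count 가 0 이 되어서 answer에 변화 없음.
--         answer += (i + 1) * 2 * count
--
--     return answer
-- ===== SOURCE B (Python) =====
-- def solution(cap, n, deliveries, pickups):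
--     # Same greedy, but each batch of round trips is computed with one
--     # ceiling division instead of a while-loop of repeated cap-additions.
--     answer = 0
--     d, p = 0, 0
--     for i in range(n - 1, -1, -1):
--         d += deliveries[i]
--         p += pickups[i]
--         trips = -(-max(d, p, 0) // cap)
--         answer += (i + 1) * 2 * trips
--         d -= trips * cap
--         p -= trips * cap
--     return answer
-- ===== Notes on version B (the rewrite author's own statement) =====
-- stated objective: alternative
-- what changed: The inner while-loop that repeatedly adds cap until both balances are nonnegative is replaced by a single ceiling division computing the number of round trips per stop in closed form.
-- outside the precondition, e.g. on solution(0, 1, [0], [0]): A returns 0, B raises ZeroDivisionError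
import Mathlib
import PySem

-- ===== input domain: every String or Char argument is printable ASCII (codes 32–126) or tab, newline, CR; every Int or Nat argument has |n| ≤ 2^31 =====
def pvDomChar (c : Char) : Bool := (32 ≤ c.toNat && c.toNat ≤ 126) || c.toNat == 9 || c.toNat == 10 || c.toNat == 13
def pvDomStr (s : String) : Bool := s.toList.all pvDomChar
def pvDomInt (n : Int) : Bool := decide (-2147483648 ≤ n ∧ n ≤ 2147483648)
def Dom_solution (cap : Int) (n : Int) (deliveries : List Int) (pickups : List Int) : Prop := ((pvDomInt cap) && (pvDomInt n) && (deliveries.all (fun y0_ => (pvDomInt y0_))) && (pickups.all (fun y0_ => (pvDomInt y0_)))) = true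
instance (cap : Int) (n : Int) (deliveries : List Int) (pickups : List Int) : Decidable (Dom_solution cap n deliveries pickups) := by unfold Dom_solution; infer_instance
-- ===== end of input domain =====

-- B replaces A's inner while-loop (repeated cap-additions) by one ceiling division
-- per stop; objective: alternative algorithm. Return-value equivalence only; neither mutates.

-- ===== PORT A =====
-- A's inner 'while d < 0 or p < 0' loop; the fuel argument is a totality guard only:
-- inside Pre_ (1 ≤ cap) the fuel supplied at the call site always suffices.
def pyWhileDP (cap : Int) : Nat → Int × Int × Int → Int × Int × Int
  | 0, s => s
  | fuel + 1, (d, p, count) =>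
    if d < 0 ∨ p < 0 then pyWhileDP cap fuel (d + cap, p + cap, count + 1)
    else (d, p, count)

def solution (cap : Int) (n : Int) (deliveries : List Int) (pickups : List Int) : Int :=
  ((PySem.List.pyRange (n - 1) (-1) (-1)).foldl
    (fun st i =>
      let d := st.2.1 - PySem.List.pyGetD deliveries i 0
      let p := st.2.2 - PySem.List.pyGetD pickups i 0
      let r := pyWhileDP cap (d.natAbs + p.natAbs + 1) (d, p, 0)
      (st.1 + (i + 1) * 2 * r.2.2, r.1, r.2.1))
    (0, 0, 0)).1

-- ===== PORT B =====
-- -(-a // b) in Python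
def ceilDiv (a b : Int) : Int := -(PySem.Int.floordiv (-a) b)

def solution_alt (cap : Int) (n : Int) (deliveries : List Int) (pickups : List Int) : Int :=
  ((PySem.List.pyRange (n - 1) (-1) (-1)).foldl
    (fun st i =>
      let d := st.2.1 + PySem.List.pyGetD deliveries i 0
      let p := st.2.2 + PySem.List.pyGetD pickups i 0
      let trips := ceilDiv (max (max d p) 0) cap
      (st.1 + (i + 1) * 2 * trips, d - trips * cap, p - trips * cap))
    (0, 0, 0)).1

-- ===== PRECONDITION & SPEC =====
-- Pre_ excludes cap ≤ 0 when there is at least one stop (n > 0), where A's while-loop diverges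
-- for any positive suffix demand (in the degenerate all-nonpositive-demand case A returns 0 while
-- B's ceiling division raises ZeroDivisionError at cap = 0), and n exceeding a list length, where
-- A raises IndexError.
def Pre_solution (cap : Int) (n : Int) (deliveries : List Int) (pickups : List Int) : Prop :=
  (1 ≤ cap ∨ n ≤ 0) ∧ n ≤ (deliveries.length : Int) ∧ n ≤ (pickups.length : Int)
instance (cap : Int) (n : Int) (deliveries : List Int) (pickups : List Int) : Decidable (Pre_solution cap n deliveries pickups) := by unfold Pre_solution; infer_instance

def pvWitness_solution : Int × Int × List Int × List Int := (4, 2, [1, 0], [0, 3])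

def Spec_solution (cap : Int) (n : Int) (deliveries : List Int) (pickups : List Int) (out : Int) : Prop := out = solution_alt cap n deliveries pickups
instance (cap : Int) (n : Int) (deliveries : List Int) (pickups : List Int) (out : Int) : Decidable (Spec_solution cap n deliveries pickups out) := by unfold Spec_solution; infer_instance

-- ===== CLAIM (what is proved, stated in full; the proofs are below) =====
def Claim_equal_solution : Prop := ∀ (cap : Int) (n : Int) (deliveries : List Int) (pickups : List Int), Dom_solution cap n deliveries pickups → Pre_solution cap n deliveries pickups → Spec_solution cap n deliveries pickups (solution cap n deliveries pickups)

-- ===== LEMMAS AND PROOFS =====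

-- ceiling-division bracket: for 0 < b, (q-1)*b < a ≤ q*b where q = ceilDiv a b
theorem ceilDiv_bracket (a b : Int) (hb : 0 < b) :
    (ceilDiv a b - 1) * b < a ∧ a ≤ ceilDiv a b * b := by
  have := (PySem.Int.neg_floordiv_neg_eq_iff_of_pos (a := a) (b := b) (q := ceilDiv a b) hb).mp rfl
  exact this

theorem ceilDiv_nonneg (a b : Int) (hb : 0 < b) (ha : 0 ≤ a) : 0 ≤ ceilDiv a b := by
  obtain ⟨_, h2⟩ := ceilDiv_bracket a b hb
  by_contra h
  push_neg at h
  nlinarith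

theorem ceilDiv_le_self (a b : Int) (hb : 1 ≤ b) (ha : 0 ≤ a) : ceilDiv a b ≤ a := by
  obtain ⟨h1, _⟩ := ceilDiv_bracket a b (by omega)
  have hk := ceilDiv_nonneg a b (by omega) ha
  nlinarith

-- the trip count at one stop, as B computes it from (negated) balances
def tripsOf (cap d p : Int) : Int := ceilDiv (max (max (-d) (-p)) 0) cap

-- A's while-loop computes exactly tripsOf many iterations (given enough fuel)
theorem pyWhileDP_eq (cap : Int) (hcap : 1 ≤ cap) :
    ∀ (fuel : Nat) (d p c : Int), (tripsOf cap d p).toNat ≤ fuel →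
      pyWhileDP cap fuel (d, p, c)
        = (d + tripsOf cap d p * cap, p + tripsOf cap d p * cap, c + tripsOf cap d p) := by
  intro fuel
  induction fuel with
  | zero =>
    intro d p c hf
    have hm : (0 : Int) ≤ max (max (-d) (-p)) 0 := le_max_right _ _
    have hk0 : 0 ≤ tripsOf cap d p := ceilDiv_nonneg _ _ (by omega) hm
    have hk : tripsOf cap d p = 0 := by omega
    simp [pyWhileDP, hk]
  | succ fuel ih =>
    intro d p c hf
    set m := max (max (-d) (-p)) 0 with hm
    have hm0 : (0 : Int) ≤ m := le_max_right _ _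
    set k := tripsOf cap d p with hkdef
    have hbr : (k - 1) * cap < m ∧ m ≤ k * cap := ceilDiv_bracket m cap (by omega)
    have hk0 : 0 ≤ k := ceilDiv_nonneg m cap (by omega) hm0
    by_cases hcond : d < 0 ∨ p < 0
    · -- loop body runs; m ≥ 1 and k ≥ 1
      have hm1 : 1 ≤ m := by
        rcases hcond with h | h
        · exact le_trans (by omega) (le_max_of_le_left (le_max_left (-d) (-p)))
        · exact le_trans (by omega) (le_max_of_le_left (le_max_right (-d) (-p)))
      have hk1 : 1 ≤ k := by nlinarith [hbr.2]
      -- next state's trip count is k - 1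
      have hm' : max (max (-(d + cap)) (-(p + cap))) 0 = max (m - cap) 0 := by
        have : max (-(d + cap)) (-(p + cap)) = max (-d) (-p) - cap := by
          rw [← max_sub_sub_right]; ring_nf
        rw [this]
        have hmm : max (max (-d) (-p)) 0 = max (-d) (-p) := by
          have : (0 : Int) ≤ max (-d) (-p) := by
            rcases hcond with h | h
            · exact le_trans (by omega) (le_max_left _ _)
            · exact le_trans (by omega) (le_max_right _ _)
          exact max_eq_left this
        rw [hm, hmm]
      have hk' : tripsOf cap (d + cap) (p + cap) = k - 1 := by
        unfold tripsOf
        rw [hm']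
        unfold ceilDiv
        rw [PySem.Int.neg_floordiv_neg_eq_iff_of_pos (by omega)]
        by_cases hmc : 0 ≤ m - cap
        · rw [max_eq_left hmc]
          constructor
          · nlinarith [hbr.1]
          · nlinarith [hbr.2]
        · push_neg at hmc
          rw [max_eq_right (by omega)]
          have hkone : k = 1 := by nlinarith [hbr.1, hbr.2]
          constructor
          · nlinarith
          · nlinarith
      have hfuel' : (tripsOf cap (d + cap) (p + cap)).toNat ≤ fuel := by
        rw [hk']; omega
      have := ih (d + cap) (p + cap) (c + 1) hfuel'
      simp only [pyWhileDP, if_pos hcond, this, hk', Prod.mk.injEq]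
      refine ⟨by ring, by ring, by ring⟩
    · -- loop exits immediately; k = 0
      push_neg at hcond
      have hmz : m = 0 := by
        have : max (-d) (-p) ≤ 0 := by omega
        rw [hm]; omega
      have hk : k = 0 := by
        have := hbr.2
        rw [hmz] at this
        nlinarith [hbr.1, hmz]
      simp [pyWhileDP, hcond.1.not_gt, hcond.2.not_gt, hk]

-- one step of A's fold matches one step of B's fold under the sign-flip invariant
theorem fold_invariant (cap : Int) (hcap : 1 ≤ cap) (deliveries pickups : List Int) :
    ∀ (l : List Int) (sA sB : Int × Int × Int),
      sA.1 = sB.1 → sA.2.1 = -sB.2.1 → sA.2.2 = -sB.2.2 →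
      (l.foldl (fun st i =>
          let d := st.2.1 - PySem.List.pyGetD deliveries i 0
          let p := st.2.2 - PySem.List.pyGetD pickups i 0
          let r := pyWhileDP cap (d.natAbs + p.natAbs + 1) (d, p, 0)
          (st.1 + (i + 1) * 2 * r.2.2, r.1, r.2.1)) sA).1
      = (l.foldl (fun st i =>
          let d := st.2.1 + PySem.List.pyGetD deliveries i 0
          let p := st.2.2 + PySem.List.pyGetD pickups i 0
          let trips := ceilDiv (max (max d p) 0) cap
          (st.1 + (i + 1) * 2 * trips, d - trips * cap, p - trips * cap)) sB).1 := by
  intro l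
  induction l with
  | nil => intro sA sB h1 h2 h3; simpa using h1
  | cons i l ih =>
    intro sA sB h1 h2 h3
    obtain ⟨aA, dA, pA⟩ := sA
    obtain ⟨aB, dB, pB⟩ := sB
    simp only at h1 h2 h3
    subst h1 h2 h3
    simp only [List.foldl_cons]
    set del := PySem.List.pyGetD deliveries i 0
    set pic := PySem.List.pyGetD pickups i 0
    set d' := -dB - del with hd'
    set p' := -pB - pic with hp'
    set k := tripsOf cap d' p' with hk
    have hfuel : (tripsOf cap d' p').toNat ≤ d'.natAbs + p'.natAbs + 1 := by
      have hm0 : (0 : Int) ≤ max (max (-d') (-p')) 0 := le_max_right _ _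
      have hle : tripsOf cap d' p' ≤ max (max (-d') (-p')) 0 :=
        ceilDiv_le_self _ _ hcap hm0
      have : max (max (-d') (-p')) 0 ≤ (d'.natAbs : Int) + p'.natAbs + 1 := by
        have h1 : -d' ≤ (d'.natAbs : Int) := by omega
        have h2 : -p' ≤ (p'.natAbs : Int) := by omega
        omega
      omega
    have hw := pyWhileDP_eq cap hcap (d'.natAbs + p'.natAbs + 1) d' p' 0 hfuel
    have htr : ceilDiv (max (max (dB + del) (pB + pic)) 0) cap = k := by
      rw [hk]; unfold tripsOf
      have : max (-d') (-p') = max (dB + del) (pB + pic) := by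
        rw [hd', hp']; ring_nf
      rw [this]
    apply ih
    · simp only [hw, htr, hk]; unfold tripsOf; simp only [hd', hp']; ring
    · simp only [hw, htr, hk]; unfold tripsOf; simp only [hd', hp']; ring
    · simp only [hw, htr, hk]; unfold tripsOf; simp only [hd', hp']; ring

-- with no stops Python's range(n-1, -1, -1) is empty
theorem pyRange_down_nil (n : Int) (h : n ≤ 0) : PySem.List.pyRange (n - 1) (-1) (-1) = [] := by
  simp [PySem.List.pyRange]
  intro hlt
  omega

-- ===== VERDICT (by name: the statement is the Claim_ definition above) =====
theorem solution_spec : Claim_equal_solution := by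
  intro cap n deliveries pickups _ hpre
  unfold Spec_solution solution solution_alt
  rcases hpre.1 with hcap | hn
  · exact fold_invariant cap hcap deliveries pickups _ (0, 0, 0) (0, 0, 0) rfl (by simp) (by simp)
  · rw [pyRange_down_nil n hn]
    rfl
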